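-- pv_equiv track=rewrite | github.com/B022MC/journal | backend/scripts/render_remote_journal_configs.py | rewrite_rpc_server_to_direct
-- ===== SOURCE A (Python) =====
-- def rewrite_rpc_server_to_direct(text: str) -> str:
--     lines = text.splitlines()
--     output: list[str] = []
--     index = 0
--
--     while index < len(lines):
--         line = lines[index]
--         if line == "Etcd:":
--             index += 1
--             while index < len(lines):
--                 child = lines[index]
--                 if child and not child.startswith("  "):
--                     break
--                 index += 1
--             continue
--
--         output.append(line)
--         index += 1
--
--     return "\n".join(output) + "\n"
-- ===== SOURCE B (Python) =====
-- def rewrite_rpc_server_to_direct(text: str) -> str: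
--     # Group lines into top-level blocks, drop blocks headed "Etcd:", flatten.
--     blocks: list[list[str]] = []
--     cur: list[str] = []
--     for line in text.splitlines():
--         if line and not line.startswith("  "):
--             blocks.append(cur)
--             cur = [line]
--         else:
--             cur.append(line)
--     blocks.append(cur)
--     kept = [b for b in blocks if b[:1] != ["Etcd:"]]
--     return "\n".join(line for b in kept for line in b) + "\n"
-- ===== Notes on version B (the rewrite author's own statement) =====
-- stated objective: alternative
-- what changed: A is a single index-driven while loop with an inner skip loop over continuation lines; B instead makes a grouping pass into top-level blocks, filters out blocks whose header is 'Etcd:', and flattens the kept blocks.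
import Mathlib
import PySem

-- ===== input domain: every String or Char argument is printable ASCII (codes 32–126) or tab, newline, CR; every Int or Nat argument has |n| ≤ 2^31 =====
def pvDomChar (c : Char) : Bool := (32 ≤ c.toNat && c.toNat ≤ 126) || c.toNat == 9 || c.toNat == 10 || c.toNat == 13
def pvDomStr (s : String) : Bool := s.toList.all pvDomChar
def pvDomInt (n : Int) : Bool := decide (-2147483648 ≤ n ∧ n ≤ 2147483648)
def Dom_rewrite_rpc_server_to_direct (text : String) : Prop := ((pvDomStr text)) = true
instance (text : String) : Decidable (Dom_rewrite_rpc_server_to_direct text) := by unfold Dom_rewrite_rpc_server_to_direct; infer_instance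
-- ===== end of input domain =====

-- B replaces A's index-driven while loop (with an inner skip loop) by a group-into-blocks /
-- filter-out-"Etcd:"-blocks / flatten decomposition; same cost, different structure.

-- ===== PORT A =====
-- inner 'while index < len(lines): child = lines[index]; if child and not child.startswith("  "): break; index += 1'
def pvSkipA : List String → List String
  | [] => []
  | c :: rest => if c ≠ "" ∧ ¬ PySem.Str.startswith c "  " then c :: rest else pvSkipA rest

theorem pvSkipA_length_le (ls : List String) : (pvSkipA ls).length ≤ ls.length := by
  induction ls with
  | nil => simp [pvSkipA]
  | cons c rest ih =>
    simp only [pvSkipA]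
    split
    · simp
    · exact Nat.le_succ_of_le ih

-- outer 'while index < len(lines)' loop, appending to output
def pvLoopA : List String → List String
  | [] => []
  | line :: rest =>
    if line = "Etcd:" then pvLoopA (pvSkipA rest)
    else line :: pvLoopA rest
termination_by ls => ls.length
decreasing_by
  · exact Nat.lt_succ_of_le (pvSkipA_length_le rest)
  · simp

def rewrite_rpc_server_to_direct (text : String) : String :=
  PySem.Str.join "\n" (pvLoopA (PySem.Str.splitlines text)) ++ "\n"

-- ===== PORT B =====
-- the grouping pass: 'for line in lines: if top-level: blocks.append(cur); cur=[line] else cur.append(line)'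
-- followed by the final 'blocks.append(cur)'
def pvGroupB : List String → List String → List (List String)
  | [], cur => [cur]
  | l :: rest, cur =>
    if l ≠ "" ∧ ¬ PySem.Str.startswith l "  " then cur :: pvGroupB rest [l]
    else pvGroupB rest (cur ++ [l])

def pvKeepB (b : List String) : Bool := b.take 1 ≠ ["Etcd:"]

def rewrite_rpc_server_to_direct_alt (text : String) : String :=
  PySem.Str.join "\n"
    (((pvGroupB (PySem.Str.splitlines text) []).filter pvKeepB).flatten) ++ "\n"

-- ===== PRECONDITION & SPEC =====
def Spec_rewrite_rpc_server_to_direct (text : String) (out : String) : Prop := out = rewrite_rpc_server_to_direct_alt text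
instance (text : String) (out : String) : Decidable (Spec_rewrite_rpc_server_to_direct text out) := by unfold Spec_rewrite_rpc_server_to_direct; infer_instance

-- ===== CLAIM (what is proved, stated in full; the proofs are below) =====
def Claim_equal_rewrite_rpc_server_to_direct : Prop := ∀ (text : String), Dom_rewrite_rpc_server_to_direct text → Spec_rewrite_rpc_server_to_direct text (rewrite_rpc_server_to_direct text)

-- ===== LEMMAS AND PROOFS =====

theorem pv_not_top_ne_etcd {l : String}
    (h : ¬ (l ≠ "" ∧ ¬ PySem.Str.startswith l "  ")) : l ≠ "Etcd:" := by
  intro hl; subst hl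
  exact h (by decide)

theorem pvGroupB_flatten (ls : List String) :
    ∀ cur : List String,
      ((pvGroupB ls cur).filter pvKeepB).flatten =
        if cur.take 1 = ["Etcd:"] then pvLoopA (pvSkipA ls) else cur ++ pvLoopA ls := by
  induction ls with
  | nil =>
    intro cur
    simp only [pvGroupB, pvSkipA, pvLoopA, List.filter, pvKeepB]
    by_cases h : cur.take 1 = ["Etcd:"] <;> simp [h]
  | cons l rest ih =>
    intro cur
    simp only [pvGroupB]
    by_cases htop : l ≠ "" ∧ ¬ PySem.Str.startswith l "  "
    · -- top-level line: block boundary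
      rw [if_pos htop]
      have hskip : pvSkipA (l :: rest) = l :: rest := by
        simp only [pvSkipA, if_pos htop]
      have hloop : pvLoopA (l :: rest) =
          if l = "Etcd:" then pvLoopA (pvSkipA rest) else l :: pvLoopA rest := by
        simp only [pvLoopA]
      have hih : ((pvGroupB rest [l]).filter pvKeepB).flatten = pvLoopA (l :: rest) := by
        rw [ih [l], hloop]
        by_cases hl : l = "Etcd:" <;> simp [hl]
      by_cases hcur : cur.take 1 = ["Etcd:"]
      · have hk : pvKeepB cur = false := by simp [pvKeepB, hcur]
        simp only [List.filter_cons, hk, Bool.false_eq_true, if_false, if_pos hcur, hskip]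
        exact hih
      · have hk : pvKeepB cur = true := by simp [pvKeepB, hcur]
        simp only [List.filter_cons, hk, if_true, List.flatten_cons, if_neg hcur]
        rw [hih]
    · -- continuation line: appended to the current block
      rw [if_neg htop, ih (cur ++ [l])]
      have hle : l ≠ "Etcd:" := pv_not_top_ne_etcd htop
      have hskip2 : pvSkipA (l :: rest) = pvSkipA rest := by
        simp only [pvSkipA, if_neg htop]
      have hloop : pvLoopA (l :: rest) = l :: pvLoopA rest := by
        simp only [pvLoopA, if_neg hle]
      cases cur with
      | nil =>
        simp only [List.nil_append, List.take_succ_cons, List.take_zero]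
        rw [if_neg (by simpa using hle), if_neg (by simp), hloop]
        simp
      | cons c cs =>
        simp only [List.cons_append, List.take_succ_cons, List.take_zero]
        by_cases hc : c = "Etcd:"
        · rw [if_pos (by simp [hc]), if_pos (by simp [hc]), hskip2]
        · rw [if_neg (by simp [hc]), if_neg (by simp [hc]), hloop]
          simp

-- ===== VERDICT (by name: the statement is the Claim_ definition above) =====
theorem rewrite_rpc_server_to_direct_spec : Claim_equal_rewrite_rpc_server_to_direct := by
  intro text _
  unfold Spec_rewrite_rpc_server_to_direct rewrite_rpc_server_to_direct rewrite_rpc_server_to_direct_alt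
  rw [pvGroupB_flatten]
  simp
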